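-- pv_equiv track=rewrite | github.com/MoqiYNU/RCTool | analyzer/net_utils.py | res_is_suff
-- ===== SOURCE A (Python) =====
-- from collections import Counter
--
-- def res_is_suff(res, req_res):
--     cou = Counter(res)
--     cou.subtract(Counter(req_res))
--     vals = cou.values()
--     for val in vals:
--         if val < 0:
--             return False
--     return True
-- ===== SOURCE B (Python) =====
-- def res_is_suff(res, req_res):
--     pool = list(res)
--     for r in req_res:
--         try:
--             pool.remove(r)
--         except ValueError:
--             return False
--     return True
-- ===== Notes on version B (the rewrite author's own statement) =====
-- stated objective: alternative
-- what changed: B abandons counting altogether: it copies res into a pool list and removes one occurrence per required item (list.remove), returning False at the first missing one, instead of building Counters, subtracting them and scanning the difference's values.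
import Mathlib
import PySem

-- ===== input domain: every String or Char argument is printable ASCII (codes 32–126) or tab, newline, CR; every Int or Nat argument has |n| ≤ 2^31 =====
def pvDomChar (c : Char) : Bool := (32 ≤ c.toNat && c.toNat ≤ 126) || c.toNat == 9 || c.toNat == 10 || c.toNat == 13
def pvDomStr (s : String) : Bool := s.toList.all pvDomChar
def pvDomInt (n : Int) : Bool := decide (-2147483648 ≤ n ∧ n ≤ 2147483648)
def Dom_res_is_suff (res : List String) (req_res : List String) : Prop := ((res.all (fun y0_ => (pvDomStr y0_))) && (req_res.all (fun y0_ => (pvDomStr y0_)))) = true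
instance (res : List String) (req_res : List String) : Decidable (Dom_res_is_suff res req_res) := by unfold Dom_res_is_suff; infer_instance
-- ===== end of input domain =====

-- B replaces A's Counter arithmetic by multiset removal: a pool list from which one
-- occurrence per required item is removed, failing on the first miss (objective: alternative).

-- ===== PORT A =====
-- cou = Counter(res); cou.subtract(Counter(req_res)) (per-item: cou[k] = cou.get(k,0) - v);
-- then 'for val in cou.values(): if val < 0: return False; return True'.
def res_is_suff (res : List String) (req_res : List String) : Bool :=
  let cou := PySem.Dict.counter res
  let cou := (PySem.Dict.counter req_res).items.foldl
      (fun d p => d.modify p.1 0 (fun v => v - p.2)) cou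
  !(cou.values.any (fun val => val < 0))

-- ===== PORT B =====
-- the for-loop over req_res with the mutable pool: 'pool.remove(r)' = PySem.List.remove?
def res_is_suff_altLoop (pool : List String) (req_res : List String) : Bool :=
  match req_res with
  | [] => true
  | r :: t =>
    match PySem.List.remove? pool r with
    | none => false
    | some pool' => res_is_suff_altLoop pool' t

def res_is_suff_alt (res : List String) (req_res : List String) : Bool :=
  res_is_suff_altLoop res req_res

-- ===== PRECONDITION & SPEC =====
def Spec_res_is_suff (res : List String) (req_res : List String) (out : Bool) : Prop := out = res_is_suff_alt res req_res
instance (res : List String) (req_res : List String) (out : Bool) : Decidable (Spec_res_is_suff res req_res out) := by unfold Spec_res_is_suff; infer_instance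

-- ===== CLAIM (what is proved, stated in full; the proofs are below) =====
def Claim_equal_res_is_suff : Prop := ∀ (res : List String) (req_res : List String), Dom_res_is_suff res req_res → Spec_res_is_suff res req_res (res_is_suff res req_res)

-- ===== LEMMAS AND PROOFS =====

-- the subtract loop, pointwise
theorem getD_foldl_modify_sub (l : List (String × Int)) (d : PySem.Dict String Int) (k : String) :
    (l.foldl (fun d p => d.modify p.1 0 (fun v => v - p.2)) d).getD k 0
      = d.getD k 0 - ((l.filter (fun p => p.1 == k)).map (·.2)).sum := by
  induction l generalizing d with
  | nil => simp
  | cons p t ih =>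
    simp only [List.foldl_cons, ih, List.filter_cons]
    rw [PySem.Dict.getD_modify]
    by_cases h : p.1 = k
    · simp [h]; ring
    · simp [h, Ne.symm h]

theorem filter_counter_items (req_res : List String) (k : String) :
    ((PySem.Dict.counter (κ := String) req_res).items.filter (fun p => p.1 == k)).map (·.2)
      = if k ∈ req_res then [(req_res.count k : Int)] else [] := by
  rw [PySem.Dict.items_counter, List.filter_map]
  have hf : (fun (p : String × Int) => p.1 == k) ∘ (fun j => (j, (req_res.count j : Int)))
      = fun j => j == k := rfl
  rw [hf]
  by_cases hk : k ∈ req_res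
  · have hmem : k ∈ PySem.Set.ofList req_res := (PySem.Set.mem_ofList _ _).2 hk
    have hnd := PySem.Set.nodup_ofList (xs := req_res)
    have hone : (PySem.Set.ofList req_res).filter (fun j => j == k) = [k] := by
      have hc : (PySem.Set.ofList req_res).count k = 1 := List.count_eq_one_of_mem hnd hmem
      have hfb := List.filter_beq (l := PySem.Set.ofList req_res) (a := k)
      rw [hfb, hc]; rfl
    simp [hone, hk]
  · have hnone : (PySem.Set.ofList req_res).filter (fun j => j == k) = [] := by
      rw [List.filter_eq_nil_iff]
      intro a ha
      simp only [beq_iff_eq]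
      intro h; subst h
      exact hk ((PySem.Set.mem_ofList _ _).1 ha)
    simp [hnone, hk]

-- the merged dict's value at k is res.count k - req_res.count k
theorem getD_merged (res req_res : List String) (k : String) :
    ((PySem.Dict.counter req_res).items.foldl
      (fun d p => d.modify p.1 0 (fun v => v - p.2)) (PySem.Dict.counter res)).getD k 0
      = (res.count k : Int) - (req_res.count k : Int) := by
  rw [getD_foldl_modify_sub, filter_counter_items, PySem.Dict.getD_counter]
  by_cases h : k ∈ req_res
  · simp [h]
  · have hz : req_res.count k = 0 := List.count_eq_zero.2 h
    simp [h, hz]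

-- A's side: True iff every resource is covered, countwise
theorem res_is_suff_iff_counts (res req_res : List String) :
    res_is_suff res req_res = true ↔ ∀ k, req_res.count k ≤ res.count k := by
  unfold res_is_suff
  simp only []
  set D := (PySem.Dict.counter req_res).items.foldl
      (fun d p => d.modify p.1 0 (fun v => v - p.2)) (PySem.Dict.counter res) with hD
  have hnd : D.keys.Nodup := by
    rw [hD]
    exact PySem.Dict.nodup_keys_foldl_modify_key _ _ _ _ _ (PySem.Dict.nodup_keys_counter _)
  have hmap : ((PySem.Dict.counter (κ := String) req_res).items.map (·.1))
      = PySem.Set.ofList req_res := PySem.Dict.keys_counter _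
  have hkeys : D.keys = PySem.Set.update (PySem.Set.ofList res) (PySem.Set.ofList req_res) := by
    rw [hD, PySem.Dict.keys_foldl_modify_key, PySem.Dict.keys_counter, hmap]
  rw [PySem.Dict.values_eq_map_keys D hnd 0, List.any_map]
  simp only [Bool.not_eq_true', List.any_eq_false, Function.comp, not_lt, decide_eq_true_eq]
  constructor
  · intro h k
    by_cases hq : k ∈ req_res
    · have hmemD : k ∈ D.keys := by
        rw [hkeys]
        exact (PySem.Set.mem_update _ _ _).2 (Or.inr ((PySem.Set.mem_ofList _ _).2 hq))
      have h0 := h k hmemD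
      rw [hD, getD_merged res req_res k] at h0
      omega
    · have hz : req_res.count k = 0 := List.count_eq_zero.2 hq
      omega
  · intro h k _
    rw [hD, getD_merged res req_res k]
    have := h k
    omega

-- B's side: the removal loop succeeds iff every requirement is covered, countwise
theorem altLoop_iff_counts (req_res : List String) : ∀ pool : List String,
    res_is_suff_altLoop pool req_res = true ↔ ∀ k, req_res.count k ≤ pool.count k := by
  induction req_res with
  | nil => intro pool; simp [res_is_suff_altLoop]
  | cons r t ih =>
    intro pool
    unfold res_is_suff_altLoop
    by_cases hmem : r ∈ pool
    · rw [PySem.List.remove?_eq_some_erase _ _ hmem]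
      rw [ih]
      have hr : 1 ≤ pool.count r := List.one_le_count_iff.2 hmem
      constructor
      · intro h k
        have hk := h k
        rw [List.count_erase] at hk
        by_cases hrk : r = k
        · subst hrk
          simp only [List.count_cons_self]
          simp only [beq_self_eq_true, if_pos] at hk
          omega
        · have e1 : List.count k (r :: t) = List.count k t := by
            simp [hrk]
          have e2 : (if (r == k) = true then 1 else 0) = 0 := by simp [hrk]
          rw [e2] at hk
          omega
      · intro h k
        have hk := h k
        rw [List.count_erase]
        by_cases hrk : r = k
        · subst hrk
          rw [List.count_cons_self] at hk
          simp only [beq_self_eq_true, if_pos]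
          omega
        · have e1 : List.count k (r :: t) = List.count k t := by
            simp [hrk]
          have e2 : (if (r == k) = true then 1 else 0) = 0 := by simp [hrk]
          rw [e2]
          omega
    · rw [(PySem.List.remove?_eq_none_iff _ _).2 hmem]
      refine iff_of_false (by simp) fun h => ?_
      have hc := h r
      have hz : pool.count r = 0 := List.count_eq_zero.2 hmem
      rw [hz, List.count_cons_self] at hc
      omega

theorem res_is_suff_eq (res req_res : List String) :
    res_is_suff res req_res = res_is_suff_alt res req_res := by
  unfold res_is_suff_alt
  rw [Bool.eq_iff_iff, res_is_suff_iff_counts, altLoop_iff_counts]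

-- ===== VERDICT (by name: the statement is the Claim_ definition above) =====
theorem res_is_suff_spec : Claim_equal_res_is_suff := by
  intro res req_res _
  unfold Spec_res_is_suff
  exact res_is_suff_eq res req_res
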